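-- pv_equiv track=rewrite | github.com/makoMakoGo/agent-toolkit | skills/grok-search/scripts/groksearch_cli.py | _strip_url_wrappers
-- ===== SOURCE A (Python) =====
-- _URL_WRAPPERS: tuple[tuple[str, str], ...] = (("<", ">"), ("(", ")"), ("[", "]"), ("{", "}"), ('"', '"'), ("'", "'"))
--
-- def _strip_url_wrappers(text: str) -> str:
--     s = (text or "").strip()
--     changed = True
--     while changed and s:
--         changed = False
--         for left, right in _URL_WRAPPERS:
--             if s.startswith(left) and s.endswith(right) and len(s) >= 2:
--                 s = s[1:-1].strip()
--                 changed = True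
--     return s
-- ===== SOURCE B (Python) =====
-- _PAIRS = {("<", ">"), ("(", ")"), ("[", "]"), ("{", "}"), ('"', '"'), ("'", "'")}
--
--
-- def _strip_url_wrappers(text: str) -> str:
--     s = text or ""
--     l, r = 0, len(s) - 1
--     while l <= r:
--         if s[l].isspace():
--             l += 1
--         elif s[r].isspace():
--             r -= 1
--         elif l < r and (s[l], s[r]) in _PAIRS:
--             l += 1
--             r -= 1
--         else:
--             break
--     return s[l:r + 1]
-- ===== Notes on version B (the rewrite author's own statement) =====
-- stated objective: alternative
-- what changed: Replaces the fixpoint while-loop of repeated s[1:-1].strip() string copies (scanning all six wrapper pairs each round) with a single inward two-pointer scan over the original string that skips whitespace and peels matching pairs via one set lookup, slicing once at the end; this avoids A's per-peel string copies (O(n*depth) worst case) but is not measurably faster on flat inputs.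
import Mathlib
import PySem

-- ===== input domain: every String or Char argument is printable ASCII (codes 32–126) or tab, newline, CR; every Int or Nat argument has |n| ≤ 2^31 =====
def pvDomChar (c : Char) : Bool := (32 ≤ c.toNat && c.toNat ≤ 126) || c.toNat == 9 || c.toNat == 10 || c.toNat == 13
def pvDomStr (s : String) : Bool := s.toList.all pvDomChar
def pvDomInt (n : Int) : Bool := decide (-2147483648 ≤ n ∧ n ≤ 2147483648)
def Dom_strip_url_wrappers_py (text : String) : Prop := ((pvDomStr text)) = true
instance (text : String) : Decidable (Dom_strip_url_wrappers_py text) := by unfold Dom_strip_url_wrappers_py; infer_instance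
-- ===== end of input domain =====

-- B replaces A's fixpoint loop of repeated s[1:-1].strip() copies by a single inward
-- two-pointer scan over the original string (objective: alternative; equal on the whole domain).

-- ===== PORT A =====
-- _URL_WRAPPERS
def pvWrappers : List (Char × Char) :=
  [('<', '>'), ('(', ')'), ('[', ']'), ('{', '}'), ('"', '"'), ('\'', '\'')]

-- one step of the inner `for left, right in _URL_WRAPPERS` body
def pvStepA (st : List Char × Bool) (p : Char × Char) : List Char × Bool :=
  if PySem.Chars.startswith st.1 [p.1] && PySem.Chars.endswith st.1 [p.2]
      && decide (2 ≤ st.1.length) then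
    (PySem.Chars.strip (PySem.Chars.slice st.1 (some 1) (some (-1))), true)
  else st

-- length bound on strip, needed for pvLoopA's termination
theorem pvStripLen (s : List Char) : (PySem.Chars.strip s).length ≤ s.length := by
  unfold PySem.Chars.strip PySem.Chars.rstrip PySem.Chars.lstrip
  have h1 := List.length_dropWhile_le PySem.Chars.isspace s
  have h2 := List.length_dropWhile_le PySem.Chars.isspace
      (List.dropWhile PySem.Chars.isspace s).reverse
  simp only [List.length_reverse] at *
  omega

-- the fold over the wrappers never lengthens the string, and sets the flag only with a strict shrink
theorem pvFoldA_len (ws : List (Char × Char)) : ∀ (s : List Char) (b : Bool),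
    (ws.foldl pvStepA (s, b)).1.length ≤ s.length ∧
    ((ws.foldl pvStepA (s, b)).2 = b ∨ (ws.foldl pvStepA (s, b)).1.length < s.length) := by
  induction ws with
  | nil => intro s b; exact ⟨le_refl _, Or.inl rfl⟩
  | cons p ws ih =>
    intro s b
    by_cases hc : (PySem.Chars.startswith s [p.1] && PySem.Chars.endswith s [p.2]
        && decide (2 ≤ s.length)) = true
    · have hlen : 2 ≤ s.length := by
        simp only [Bool.and_eq_true, decide_eq_true_eq] at hc; exact hc.2
      have hstep : pvStepA (s, b) p
          = (PySem.Chars.strip (PySem.Chars.slice s (some 1) (some (-1))), true) := by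
        simp [pvStepA, hc]
      have hs' : (PySem.Chars.strip (PySem.Chars.slice s (some 1) (some (-1)))).length
          < s.length := by
        have h1 := pvStripLen (PySem.Chars.slice s (some 1) (some (-1)))
        have h2 : (PySem.List.slice s (some (1:Int)) (some (-1:Int))).length
            = PySem.List.clampIdx s.length (-1) - PySem.List.clampIdx s.length 1 :=
          PySem.List.length_slice s 1 (-1)
        have h3 : PySem.List.clampIdx s.length (-1) = s.length - 1 :=
          PySem.List.clampIdx_neg_one s.length
        have h4 : PySem.List.clampIdx s.length (1 : Int) = min 1 s.length := by
          simp
        simp only [PySem.Chars.slice_eq_listSlice] at h1 ⊢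
        omega
      have := ih (PySem.Chars.strip (PySem.Chars.slice s (some 1) (some (-1)))) true
      simp only [List.foldl_cons, hstep]
      exact ⟨le_of_lt (lt_of_le_of_lt this.1 hs'), Or.inr (lt_of_le_of_lt this.1 hs')⟩
    · have hstep : pvStepA (s, b) p = (s, b) := by simp [pvStepA, hc]
      simp only [List.foldl_cons, hstep]
      exact ih s b

-- the `while changed and s:` loop of A (entered with changed = True)
def pvLoopA (s : List Char) : List Char :=
  if s.isEmpty then s
  else
    let r := pvWrappers.foldl pvStepA (s, false)
    if h : r.2 = true then pvLoopA r.1 else r.1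
termination_by s.length
decreasing_by
  have hf := pvFoldA_len pvWrappers s false
  rcases hf.2 with h' | h'
  · rw [h] at h'; exact absurd h' (by decide)
  · exact h'

def strip_url_wrappers_py (text : String) : String :=
  -- s = (text or "").strip()
  let s0 := if text.isEmpty then "" else text
  String.ofList (pvLoopA (PySem.Chars.strip s0.toList))

-- ===== PORT B =====
-- _PAIRS (a set of six distinct pairs, kept as its literal element list)
def pvPairs : List (Char × Char) :=
  [('<', '>'), ('(', ')'), ('[', ']'), ('{', '}'), ('"', '"'), ('\'', '\'')]

-- the two-pointer `while l <= r:` loop; s[l]/s[r] are ported as getD (always in range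
-- when l ≤ r < cs.length, which holds at every actual indexing of Source B)
def pvBGo (cs : List Char) (l r : Nat) : Nat × Nat :=
  if hlr : l ≤ r then
    if hwl : PySem.Chars.isspace (cs.getD l ' ') = true then
      pvBGo cs (l + 1) r
    else if hwr : PySem.Chars.isspace (cs.getD r ' ') = true then
      pvBGo cs l (r - 1)
    else if hp : l < r ∧ pvPairs.contains (cs.getD l ' ', cs.getD r ' ') = true then
      pvBGo cs (l + 1) (r - 1)
    else (l, r)
  else (l, r)
termination_by r + 1 - l
decreasing_by
  · omega
  · have : l ≠ r := by intro h; rw [h] at hwl; exact hwl hwr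
    omega
  · omega

def strip_url_wrappers_py_alt (text : String) : String :=
  let s := if text.isEmpty then "" else text
  let cs := s.toList
  let lr := pvBGo cs 0 (cs.length - 1)
  String.ofList (PySem.List.slice cs (some (lr.1 : Int)) (some ((lr.2 + 1 : Nat) : Int)))

-- ===== PRECONDITION & SPEC =====
def Spec_strip_url_wrappers_py (text : String) (out : String) : Prop := out = strip_url_wrappers_py_alt text
instance (text : String) (out : String) : Decidable (Spec_strip_url_wrappers_py text out) := by unfold Spec_strip_url_wrappers_py; infer_instance

-- ===== CLAIM (what is proved, stated in full; the proofs are below) =====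
def Claim_equal_strip_url_wrappers_py : Prop := ∀ (text : String), Dom_strip_url_wrappers_py text → Spec_strip_url_wrappers_py text (strip_url_wrappers_py text)

-- ===== LEMMAS AND PROOFS =====

-- canonical normal form: strip outer whitespace, peel one matching wrapper pair, repeat
def pvNormCond (t : List Char) : Bool :=
  decide (2 ≤ t.length) && pvWrappers.contains (t.headD ' ', t.getLastD ' ')

def pvNorm (s : List Char) : List Char :=
  if pvNormCond (PySem.Chars.strip s) then pvNorm ((PySem.Chars.strip s).tail.dropLast)
  else PySem.Chars.strip s
termination_by s.length
decreasing_by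
  have h1 := pvStripLen s
  rename_i ht
  unfold pvNormCond at ht
  simp only [Bool.and_eq_true, decide_eq_true_eq] at ht
  simp only [List.length_dropLast, List.length_tail]
  omega

-- dropWhile facts ------------------------------------------------------------
theorem pvDwHead (p : Char → Bool) (d : Char) : ∀ l : List Char,
    List.dropWhile p l = [] ∨ p ((List.dropWhile p l).headD d) = false := by
  intro l; induction l with
  | nil => exact Or.inl rfl
  | cons a t ih =>
    by_cases h : p a = true
    · simpa [List.dropWhile_cons, h] using ih
    · right; simp [h]

theorem pvDwSelf (p : Char → Bool) (l : List Char) (h : p (l.headD ' ') = false) :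
    List.dropWhile p l = l := by
  cases l with
  | nil => rfl
  | cons a t => simp only [List.headD_cons] at h; simp [h]

-- strip facts ----------------------------------------------------------------
theorem pvRstripPrefix (v : List Char) : PySem.Chars.rstrip v <+: v := by
  unfold PySem.Chars.rstrip
  have h : List.dropWhile PySem.Chars.isspace v.reverse <:+ v.reverse := List.dropWhile_suffix _
  have := List.reverse_prefix.mpr (by simpa using h)
  simpa using this

theorem pvHeadDPrefix (u v : List Char) (h : u <+: v) (hu : u ≠ []) (d : Char) :
    v.headD d = u.headD d := by
  rcases h with ⟨w, rfl⟩
  cases u with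
  | nil => exact absurd rfl hu
  | cons a t => simp

theorem pvStripHead (s : List Char) :
    PySem.Chars.strip s = [] ∨ PySem.Chars.isspace ((PySem.Chars.strip s).headD ' ') = false := by
  by_cases hn : PySem.Chars.strip s = []
  · exact Or.inl hn
  · right
    have hpre : PySem.Chars.strip s <+: PySem.Chars.lstrip s := pvRstripPrefix _
    have hlh := pvDwHead PySem.Chars.isspace ' ' s
    have hne : PySem.Chars.lstrip s ≠ [] := by
      intro h; apply hn
      have := List.prefix_nil.mp (h ▸ hpre); exact this
    have heq : (PySem.Chars.lstrip s).headD ' ' = (PySem.Chars.strip s).headD ' ' :=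
      pvHeadDPrefix _ _ hpre hn ' '
    rcases hlh with h | h
    · exact absurd (show PySem.Chars.lstrip s = [] from h) hne
    · rw [← heq]
      exact h

theorem pvLastDReverse (u : List Char) (d : Char) : u.reverse.getLastD d = u.headD d := by
  rw [List.getLastD_eq_getLast?, List.getLast?_reverse, List.headD_eq_head?]

theorem pvHeadDReverse (u : List Char) (d : Char) : u.reverse.headD d = u.getLastD d := by
  rw [List.headD_eq_head?, List.head?_reverse, List.getLastD_eq_getLast?]

theorem pvStripLast (s : List Char) :
    PySem.Chars.strip s = [] ∨ PySem.Chars.isspace ((PySem.Chars.strip s).getLastD ' ') = false := by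
  have hdef : PySem.Chars.strip s
      = (List.dropWhile PySem.Chars.isspace (PySem.Chars.lstrip s).reverse).reverse := rfl
  rcases pvDwHead PySem.Chars.isspace ' ' (PySem.Chars.lstrip s).reverse with h | h
  · left; rw [hdef, h]; rfl
  · right; rw [hdef, pvLastDReverse]; exact h

theorem pvStripConsWS (c : Char) (t : List Char) (h : PySem.Chars.isspace c = true) :
    PySem.Chars.strip (c :: t) = PySem.Chars.strip t := by
  unfold PySem.Chars.strip PySem.Chars.lstrip
  rw [List.dropWhile_cons_of_pos h]

theorem pvLstripSelf (t : List Char) (h : PySem.Chars.isspace (t.headD ' ') = false) :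
    PySem.Chars.lstrip t = t := pvDwSelf _ _ h

theorem pvRstripSelf (t : List Char) (h : PySem.Chars.isspace (t.getLastD ' ') = false) :
    PySem.Chars.rstrip t = t := by
  unfold PySem.Chars.rstrip
  rw [pvDwSelf _ _ (by rw [pvHeadDReverse]; exact h), List.reverse_reverse]

theorem pvRstripConcatWS (u : List Char) (c : Char) (h : PySem.Chars.isspace c = true) :
    PySem.Chars.rstrip (u ++ [c]) = PySem.Chars.rstrip u := by
  unfold PySem.Chars.rstrip
  rw [List.reverse_append]
  simp only [List.reverse_cons, List.reverse_nil, List.nil_append, List.singleton_append]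
  rw [List.dropWhile_cons_of_pos h]

theorem pvStripConcatWS (t : List Char) (c : Char) (h : PySem.Chars.isspace c = true) :
    PySem.Chars.strip (t ++ [c]) = PySem.Chars.strip t := by
  unfold PySem.Chars.strip PySem.Chars.lstrip
  rw [List.dropWhile_append]
  by_cases he : List.dropWhile PySem.Chars.isspace t = []
  · rw [if_pos (by simp [he]), he]
    simp [List.dropWhile_cons_of_pos h]
  · rw [if_neg (by simp [he])]
    exact pvRstripConcatWS _ _ h

theorem pvStripEnds (t : List Char)
    (h1 : PySem.Chars.isspace (t.headD ' ') = false)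
    (h2 : PySem.Chars.isspace (t.getLastD ' ') = false) :
    PySem.Chars.strip t = t := by
  unfold PySem.Chars.strip
  rw [show PySem.Chars.lstrip t = t from pvLstripSelf t h1]
  exact pvRstripSelf t h2

theorem pvStripStrip (s : List Char) :
    PySem.Chars.strip (PySem.Chars.strip s) = PySem.Chars.strip s := by
  rcases pvStripHead s with h | h
  · rw [h]; rfl
  · rcases pvStripLast s with h2 | h2
    · rw [h2]; rfl
    · exact pvStripEnds _ h h2

-- pvNorm facts ---------------------------------------------------------------
theorem pvNormCongr (s s' : List Char) (h : PySem.Chars.strip s = PySem.Chars.strip s') :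
    pvNorm s = pvNorm s' := by
  conv_lhs => rw [pvNorm]
  conv_rhs => rw [pvNorm]
  rw [h]

theorem pvNormStrip (s : List Char) : pvNorm (PySem.Chars.strip s) = pvNorm s :=
  pvNormCongr _ _ (pvStripStrip s)

theorem pvNormConsWS (c : Char) (t : List Char) (h : PySem.Chars.isspace c = true) :
    pvNorm (c :: t) = pvNorm t :=
  pvNormCongr _ _ (pvStripConsWS c t h)

theorem pvNormConcatWS (t : List Char) (c : Char) (h : PySem.Chars.isspace c = true) :
    pvNorm (t ++ [c]) = pvNorm t :=
  pvNormCongr _ _ (pvStripConcatWS t c h)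

theorem pvNormPeel (t : List Char) (hs : PySem.Chars.strip t = t)
    (hc : pvNormCond t = true) : pvNorm t = pvNorm (t.tail.dropLast) := by
  rw [pvNorm]; simp only [hs, hc, if_pos]

theorem pvNormSelf (t : List Char) (hs : PySem.Chars.strip t = t)
    (hc : pvNormCond t = false) : pvNorm t = t := by
  rw [pvNorm]; simp only [hs, hc]; simp

theorem pvNormNil : pvNorm [] = [] := by
  rw [pvNorm]; simp [pvNormCond, PySem.Chars.strip, PySem.Chars.lstrip, PySem.Chars.rstrip]

-- A-side ---------------------------------------------------------------------
theorem pvSliceTailDropLast (s : List Char) (h : 2 ≤ s.length) :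
    PySem.Chars.slice s (some 1) (some (-1)) = s.tail.dropLast := by
  rw [PySem.Chars.slice_eq_listSlice]
  have hc1 : PySem.List.clampIdx s.length 1 = 1 := by
    have hm : PySem.List.clampIdx s.length ((1 : Nat) : Int) = min 1 s.length :=
      PySem.List.clampIdx_natCast s.length 1
    simp only [Nat.cast_one] at hm
    rw [hm]; omega
  have hc2 : PySem.List.clampIdx s.length (-1) = s.length - 1 :=
    PySem.List.clampIdx_neg_one s.length
  unfold PySem.List.slice
  simp only [hc1, hc2]
  rw [← List.drop_one, List.dropLast_eq_take, List.length_drop]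

theorem pvHeadDOfStarts (s : List Char) (a : Char)
    (h : PySem.Chars.startswith s [a] = true) (hne : s ≠ []) : s.headD ' ' = a := by
  rcases (PySem.Chars.startswith_iff _ _).mp h with ⟨w, rfl⟩
  simp

theorem pvLastDOfEnds (s : List Char) (a : Char)
    (h : PySem.Chars.endswith s [a] = true) (hne : s ≠ []) : s.getLastD ' ' = a := by
  rcases (PySem.Chars.endswith_iff _ _).mp h with ⟨w, rfl⟩
  simp

-- A's per-pair condition implies the canonical peel condition
theorem pvCondToNorm (s : List Char) (p : Char × Char) (hp : p ∈ pvWrappers)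
    (hc : (PySem.Chars.startswith s [p.1] && PySem.Chars.endswith s [p.2]
      && decide (2 ≤ s.length)) = true) : pvNormCond s = true := by
  simp only [Bool.and_eq_true, decide_eq_true_eq] at hc
  obtain ⟨⟨h1, h2⟩, h3⟩ := hc
  have hne : s ≠ [] := by intro h; rw [h] at h3; simp at h3
  unfold pvNormCond
  rw [pvHeadDOfStarts s p.1 h1 hne, pvLastDOfEnds s p.2 h2 hne]
  simp only [Bool.and_eq_true, decide_eq_true_eq]
  exact ⟨h3, List.contains_iff_mem.mpr (by simpa using hp)⟩

-- the canonical peel condition yields a firing pair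
theorem pvNormToCond (s : List Char) (hn : pvNormCond s = true) :
    (s.headD ' ', s.getLastD ' ') ∈ pvWrappers ∧
    (PySem.Chars.startswith s [s.headD ' '] && PySem.Chars.endswith s [s.getLastD ' ']
      && decide (2 ≤ s.length)) = true := by
  unfold pvNormCond at hn
  simp only [Bool.and_eq_true, decide_eq_true_eq] at hn
  obtain ⟨h2, hmem⟩ := hn
  have hne : s ≠ [] := by intro h; rw [h] at h2; simp at h2
  refine ⟨List.contains_iff_mem.mp hmem, ?_⟩
  simp only [Bool.and_eq_true, decide_eq_true_eq]
  refine ⟨⟨(PySem.Chars.startswith_iff _ _).mpr ⟨s.tail, ?_⟩,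
    (PySem.Chars.endswith_iff _ _).mpr ⟨s.dropLast, ?_⟩⟩, h2⟩
  · cases s with | nil => simp at hne | cons a t => simp
  · rcases List.eq_nil_or_concat s with rfl | ⟨t, c, rfl⟩
    · simp at hne
    · simp

-- the fold preserves strippedness and the normal form
theorem pvFoldAKeep (ws : List (Char × Char)) (hsub : ∀ p ∈ ws, p ∈ pvWrappers) :
    ∀ (s : List Char) (b : Bool), PySem.Chars.strip s = s →
      PySem.Chars.strip (ws.foldl pvStepA (s, b)).1 = (ws.foldl pvStepA (s, b)).1 ∧
      pvNorm (ws.foldl pvStepA (s, b)).1 = pvNorm s := by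
  induction ws with
  | nil => intro s b hs; exact ⟨hs, rfl⟩
  | cons p ws ih =>
    intro s b hs
    by_cases hc : (PySem.Chars.startswith s [p.1] && PySem.Chars.endswith s [p.2]
        && decide (2 ≤ s.length)) = true
    · have hlen : 2 ≤ s.length := by
        simp only [Bool.and_eq_true, decide_eq_true_eq] at hc; exact hc.2
      have hstep : pvStepA (s, b) p
          = (PySem.Chars.strip (PySem.Chars.slice s (some 1) (some (-1))), true) := by
        simp [pvStepA, hc]
      have hsl : PySem.Chars.slice s (some 1) (some (-1)) = s.tail.dropLast :=
        pvSliceTailDropLast s hlen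
      have hnorm : pvNorm (PySem.Chars.strip (PySem.Chars.slice s (some 1) (some (-1))))
          = pvNorm s := by
        rw [pvNormStrip, hsl, ← pvNormPeel s hs (pvCondToNorm s p (hsub p List.mem_cons_self) hc)]
      have := ih (fun q hq => hsub q (List.mem_cons_of_mem p hq))
        (PySem.Chars.strip (PySem.Chars.slice s (some 1) (some (-1)))) true (pvStripStrip _)
      simp only [List.foldl_cons, hstep]
      exact ⟨this.1, this.2.trans hnorm⟩
    · have hstep : pvStepA (s, b) p = (s, b) := by simp [pvStepA, hc]
      simp only [List.foldl_cons, hstep]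
      exact ih (fun q hq => hsub q (List.mem_cons_of_mem p hq)) s b hs

-- if the flag stays false, nothing fired and nothing could fire
theorem pvFoldSndTrue (ws : List (Char × Char)) : ∀ (s : List Char),
    (ws.foldl pvStepA (s, true)).2 = true := by
  induction ws with
  | nil => intro s; rfl
  | cons p ws ih =>
    intro s
    by_cases hc : (PySem.Chars.startswith s [p.1] && PySem.Chars.endswith s [p.2]
        && decide (2 ≤ s.length)) = true
    · simp only [List.foldl_cons, show pvStepA (s, true) p
          = (PySem.Chars.strip (PySem.Chars.slice s (some 1) (some (-1))), true) from by
        simp [pvStepA, hc]]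
      exact ih _
    · simp only [List.foldl_cons, show pvStepA (s, true) p = (s, true) from by simp [pvStepA, hc]]
      exact ih s

theorem pvFoldANoFire (ws : List (Char × Char)) :
    ∀ (s : List Char), (ws.foldl pvStepA (s, false)).2 = false →
      (ws.foldl pvStepA (s, false)).1 = s ∧
      ∀ p ∈ ws, (PySem.Chars.startswith s [p.1] && PySem.Chars.endswith s [p.2]
        && decide (2 ≤ s.length)) = false := by
  induction ws with
  | nil => intro s _; exact ⟨rfl, by simp⟩
  | cons p ws ih =>
    intro s hf
    by_cases hc : (PySem.Chars.startswith s [p.1] && PySem.Chars.endswith s [p.2]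
        && decide (2 ≤ s.length)) = true
    · exfalso
      rw [List.foldl_cons, show pvStepA (s, false) p
          = (PySem.Chars.strip (PySem.Chars.slice s (some 1) (some (-1))), true) from by
        simp [pvStepA, hc]] at hf
      rw [pvFoldSndTrue ws _] at hf
      exact absurd hf (by decide)
    · rw [List.foldl_cons, show pvStepA (s, false) p = (s, false) from by simp [pvStepA, hc]] at hf
      obtain ⟨h1, h2⟩ := ih s hf
      rw [List.foldl_cons, show pvStepA (s, false) p = (s, false) from by simp [pvStepA, hc]]
      exact ⟨h1, fun q hq => by
        rcases List.mem_cons.mp hq with rfl | hq'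
        · exact Bool.eq_false_iff.mpr hc
        · exact h2 q hq'⟩

theorem pvLoopANorm : ∀ (n : Nat) (s : List Char), s.length ≤ n →
    PySem.Chars.strip s = s → pvLoopA s = pvNorm s := by
  intro n
  induction n with
  | zero =>
    intro s hn _
    have : s = [] := List.eq_nil_of_length_eq_zero (Nat.le_zero.mp hn)
    subst this
    rw [pvLoopA, pvNormNil]; rfl
  | succ n ih =>
    intro s hn hs
    by_cases hse : s = []
    · subst hse; rw [pvLoopA, pvNormNil]; rfl
    · rw [pvLoopA, if_neg (by simpa [List.isEmpty_iff] using hse)]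
      by_cases hR : (pvWrappers.foldl pvStepA (s, false)).2 = true
      · rw [dif_pos hR]
        have hlen := pvFoldA_len pvWrappers s false
        have hlt : (pvWrappers.foldl pvStepA (s, false)).1.length < s.length := by
          rcases hlen.2 with h | h
          · rw [hR] at h; exact absurd h (by decide)
          · exact h
        have hkeep := pvFoldAKeep pvWrappers (fun p hp => hp) s false hs
        rw [ih _ (by omega) hkeep.1, hkeep.2]
      · rw [dif_neg hR]
        obtain ⟨h1, h2⟩ := pvFoldANoFire pvWrappers s (Bool.eq_false_iff.mpr hR)
        rw [h1]
        have hcond : pvNormCond s = false := by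
          by_contra hcc
          obtain ⟨hmem, hfire⟩ := pvNormToCond s (by
            cases h : pvNormCond s
            · exact absurd h hcc
            · rfl)
          have := h2 _ hmem
          simp only at this
          rw [this] at hfire
          exact absurd hfire (by decide)
        exact (pvNormSelf s hs hcond).symm

theorem pvPortA (text : String) :
    strip_url_wrappers_py text = String.ofList (pvNorm text.toList) := by
  unfold strip_url_wrappers_py
  have hs0 : (if text.isEmpty then "" else text).toList = text.toList := by
    by_cases he : text.isEmpty
    · rw [if_pos he]
      rw [String.isEmpty_iff] at he
      rw [he]
    · rw [if_neg he]
  simp only [hs0]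
  rw [pvLoopANorm (PySem.Chars.strip text.toList).length _ (le_refl _) (pvStripStrip _),
    pvNormStrip]

-- B-side ---------------------------------------------------------------------
-- window decomposition lemmas
theorem pvWinCons (cs : List Char) (l r : Nat) (hlr : l ≤ r) (hl : l < cs.length) :
    (cs.drop l).take (r + 1 - l) = cs[l] :: (cs.drop (l + 1)).take (r + 1 - (l + 1)) := by
  rw [List.drop_eq_getElem_cons hl, show r + 1 - l = (r + 1 - (l + 1)) + 1 from by omega,
    List.take_succ_cons]

theorem pvWinSnoc (cs : List Char) (l r : Nat) (hlr : l ≤ r) (hr : r < cs.length) :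
    (cs.drop l).take (r + 1 - l) = (cs.drop l).take (r - l) ++ [cs[r]] := by
  rw [show r + 1 - l = (r - l) + 1 from by omega, List.take_add_one]
  have h1 : (cs.drop l)[r - l]? = some cs[r] := by
    rw [List.getElem?_drop, show l + (r - l) = r from by omega, List.getElem?_eq_getElem hr]
  rw [h1]
  rfl

theorem pvGetDElem (cs : List Char) (l : Nat) (h : l < cs.length) : cs.getD l ' ' = cs[l] := by
  simp [List.getD_eq_getElem?_getD, List.getElem?_eq_getElem h]

theorem pvBGoNorm : ∀ (n : Nat) (cs : List Char) (l r : Nat), r + 1 - l ≤ n →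
    (l ≤ r → r < cs.length) →
    ((cs.drop (pvBGo cs l r).1).take ((pvBGo cs l r).2 + 1 - (pvBGo cs l r).1))
      = pvNorm ((cs.drop l).take (r + 1 - l)) := by
  intro n
  induction n with
  | zero =>
    intro cs l r hn _
    have hlr : ¬ l ≤ r := by omega
    rw [pvBGo, dif_neg hlr, show r + 1 - l = 0 from by omega]
    simp [pvNormNil]
  | succ n ih =>
    intro cs l r hn hinv
    by_cases hlr : l ≤ r
    · have hr : r < cs.length := hinv hlr
      have hl : l < cs.length := lt_of_le_of_lt hlr hr
      have hdl : cs.getD l ' ' = cs[l] := pvGetDElem cs l hl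
      have hdr : cs.getD r ' ' = cs[r] := pvGetDElem cs r hr
      rw [pvBGo, dif_pos hlr]
      by_cases hwl : PySem.Chars.isspace (cs.getD l ' ') = true
      · rw [dif_pos hwl]
        rw [ih cs (l + 1) r (by omega) (fun _ => hr)]
        rw [pvWinCons cs l r hlr hl]
        rw [pvNormConsWS _ _ (by rw [← hdl]; exact hwl)]
      · rw [dif_neg hwl]
        by_cases hwr : PySem.Chars.isspace (cs.getD r ' ') = true
        · have hne : l ≠ r := by intro h; rw [h] at hwl; exact hwl hwr
          rw [dif_pos hwr]
          rw [ih cs l (r - 1) (by omega) (fun _ => by omega)]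
          rw [pvWinSnoc cs l r hlr hr]
          rw [pvNormConcatWS _ _ (by rw [← hdr]; exact hwr)]
          rw [show (r - 1) + 1 - l = r - l from by omega]
        · rw [dif_neg hwr]
          have hwin : (cs.drop l).take (r + 1 - l) ≠ [] := by
            rw [pvWinCons cs l r hlr hl]; simp
          have hhead : ((cs.drop l).take (r + 1 - l)).headD ' ' = cs[l] := by
            rw [pvWinCons cs l r hlr hl]; simp
          have hlast : ((cs.drop l).take (r + 1 - l)).getLastD ' ' = cs[r] := by
            rw [pvWinSnoc cs l r hlr hr, List.getLastD_concat]
          have hstrip : PySem.Chars.strip ((cs.drop l).take (r + 1 - l))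
              = (cs.drop l).take (r + 1 - l) := by
            apply pvStripEnds
            · rw [hhead, ← hdl]; exact Bool.eq_false_iff.mpr hwl
            · rw [hlast, ← hdr]; exact Bool.eq_false_iff.mpr hwr
          have hwlen : ((cs.drop l).take (r + 1 - l)).length = r + 1 - l := by
            rw [List.length_take, List.length_drop]; omega
          by_cases hp : l < r ∧ pvPairs.contains (cs.getD l ' ', cs.getD r ' ') = true
          · rw [dif_pos hp]
            have hcond : pvNormCond ((cs.drop l).take (r + 1 - l)) = true := by
              unfold pvNormCond
              rw [hhead, hlast, hwlen]
              simp only [Bool.and_eq_true, decide_eq_true_eq]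
              refine ⟨by omega, ?_⟩
              rw [show pvWrappers = pvPairs from rfl, ← hdl, ← hdr]
              exact hp.2
            rw [ih cs (l + 1) (r - 1) (by omega) (fun _ => by omega)]
            rw [pvNormPeel _ hstrip hcond]
            congr 1
            rw [pvWinCons cs l r hlr hl, List.tail_cons,
              pvWinSnoc cs (l + 1) r hp.1 hr, List.dropLast_concat]
            rw [show (r - 1) + 1 - (l + 1) = r - (l + 1) from by omega]
          · rw [dif_neg hp]
            have hcond : pvNormCond ((cs.drop l).take (r + 1 - l)) = false := by
              unfold pvNormCond
              rw [hhead, hlast, hwlen]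
              by_cases hlt : l < r
              · have hcf : pvPairs.contains (cs.getD l ' ', cs.getD r ' ') = false := by
                  cases hcc : pvPairs.contains (cs.getD l ' ', cs.getD r ' ')
                  · rfl
                  · exact absurd ⟨hlt, hcc⟩ hp
                rw [show pvWrappers = pvPairs from rfl, ← hdl, ← hdr, hcf]
                simp
              · have : r + 1 - l = 1 := by omega
                rw [this]
                simp
            exact (pvNormSelf _ hstrip hcond).symm
    · rw [pvBGo, dif_neg hlr, show r + 1 - l = 0 from by omega]
      simp [pvNormNil]

theorem pvBGoNilNil : pvBGo ([] : List Char) 0 0 = (1, 0) := by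
  rw [pvBGo, dif_pos (le_refl 0),
    dif_pos (by decide : PySem.Chars.isspace (([] : List Char).getD 0 ' ') = true)]
  rw [pvBGo]
  exact dif_neg (by omega)

theorem pvPortB (text : String) :
    strip_url_wrappers_py_alt text = String.ofList (pvNorm text.toList) := by
  unfold strip_url_wrappers_py_alt
  have hs0 : (if text.isEmpty then "" else text).toList = text.toList := by
    by_cases he : text.isEmpty
    · rw [if_pos he]
      rw [String.isEmpty_iff] at he
      rw [he]
    · rw [if_neg he]
  simp only [hs0]
  by_cases hcs : text.toList = []
  · rw [hcs]
    simp only [List.length_nil, Nat.zero_sub, pvBGoNilNil, pvNormNil]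
    rfl
  · have hpos : 0 < text.toList.length := List.length_pos_of_ne_nil hcs
    have hmain := pvBGoNorm text.toList.length text.toList 0 (text.toList.length - 1)
      (by omega) (by intro _; omega)
    rw [show text.toList.length - 1 + 1 - 0 = text.toList.length from by omega,
      List.drop_zero, List.take_length] at hmain
    have hcast : ∀ (a b : Nat) (u : List Char), PySem.List.slice u (some (a : Int))
        (some ((b : Nat) : Int)) = (u.drop a).take (b - a) := fun a b u =>
      PySem.List.slice_natCast u a b
    rw [hcast]
    rw [hmain]

-- ===== VERDICT (by name: the statement is the Claim_ definition above) =====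
theorem strip_url_wrappers_py_spec : Claim_equal_strip_url_wrappers_py := by
  intro text _
  unfold Spec_strip_url_wrappers_py
  rw [pvPortA, pvPortB]
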